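-- pv_equiv track=rewrite | github.com/DT-HYUNJUN/Baekjoon-hub | 백준/Silver/1065. 한수/한수.py | func
-- ===== SOURCE A (Python) =====
-- def func(a):
--     cnt = 0
--     for i in range(1, a+1):
--         if i < 100:
--             cnt += 1
--         elif 1000> i >= 100:
--             lst = list(map(int, str(i)))
--             for j in range(0, len(lst)-2):
--                 if lst[j]-(lst[j+1]) == (lst[j+1])-(lst[j+2]):
--                     cnt += 1
--     return cnt
-- ===== SOURCE B (Python) =====
-- def func(a):
--     cnt = max(0, min(a, 99))
--     if a >= 100:
--         for h in range(1, 10):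
--             for d in range(-4, 5):
--                 t, u = h + d, h + 2 * d
--                 if 0 <= t <= 9 and 0 <= u <= 9:
--                     n = 100 * h + 10 * t + u
--                     if n <= a:
--                         cnt += 1
--     return cnt
-- ===== Notes on version B (the rewrite author's own statement) =====
-- stated objective: faster
-- what changed: B replaces A's linear scan of every integer up to a (with per-number string digit extraction) by a closed-form clipped count of the one- and two-digit numbers plus direct enumeration of the few three-digit digit-arithmetic-progression candidates (first digit x common difference), counting those <= a.
import Mathlib
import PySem

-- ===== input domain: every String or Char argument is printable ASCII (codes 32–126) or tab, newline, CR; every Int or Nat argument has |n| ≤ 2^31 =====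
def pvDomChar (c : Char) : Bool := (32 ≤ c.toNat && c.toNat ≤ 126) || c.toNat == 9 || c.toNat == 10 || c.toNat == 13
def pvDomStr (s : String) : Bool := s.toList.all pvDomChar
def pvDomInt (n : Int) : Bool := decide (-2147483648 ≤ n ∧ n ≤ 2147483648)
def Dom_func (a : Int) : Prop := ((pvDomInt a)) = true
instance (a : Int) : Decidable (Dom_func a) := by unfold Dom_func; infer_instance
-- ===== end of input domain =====

-- B replaces A's O(a) scan of every number by a clipped count of 1–2-digit numbers
-- plus direct enumeration of the ≤ 45 three-digit digit-AP candidates (O(1)).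

-- ===== PORT A =====
-- loop body of A's 'for i in range(1, a+1)' (named so the proofs can speak about one step)
def funcBody (cnt i : Int) : Int :=
  if i < 100 then cnt + 1
  else if 1000 > i ∧ i ≥ 100 then
    -- list(map(int, str(i))): char→digit via code-48, exact because str(i) here is all digits (i ≥ 100)
    let lst : List Int := (PySem.Int.toChars i).map (fun c => ((c.toNat : Int) - 48))
    (PySem.List.pyRange 0 ((lst.length : Int) - 2) 1).foldl (fun cnt j =>
      if PySem.List.pyGetD lst j 0 - PySem.List.pyGetD lst (j+1) 0
         = PySem.List.pyGetD lst (j+1) 0 - PySem.List.pyGetD lst (j+2) 0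
      then cnt + 1 else cnt) cnt
  else cnt

def func (a : Int) : Int :=
  (PySem.List.pyRange 1 (a+1) 1).foldl funcBody 0

-- ===== PORT B =====
def func_alt (a : Int) : Int :=
  let cnt : Int := max 0 (min a 99)
  if a ≥ 100 then
    (PySem.List.pyRange 1 10 1).foldl (fun cnt h =>
      (PySem.List.pyRange (-4) 5 1).foldl (fun cnt d =>
        let t := h + d
        let u := h + 2 * d
        if 0 ≤ t ∧ t ≤ 9 ∧ 0 ≤ u ∧ u ≤ 9 then
          if 100 * h + 10 * t + u ≤ a then cnt + 1 else cnt
        else cnt) cnt) cnt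
  else cnt

-- ===== PRECONDITION & SPEC =====
def Spec_func (a : Int) (out : Int) : Prop := out = func_alt a
instance (a : Int) (out : Int) : Decidable (Spec_func a out) := by unfold Spec_func; infer_instance

-- ===== CLAIM (what is proved, stated in full; the proofs are below) =====
def Claim_equal_func : Prop := ∀ (a : Int), Dom_func a → Spec_func a (func a)

-- ===== LEMMAS AND PROOFS =====

lemma funcBody_high (c i : Int) (h : 1000 ≤ i) : funcBody c i = c := by
  unfold funcBody
  rw [if_neg (by omega), if_neg (by rintro ⟨h1, _⟩; omega)]

lemma func_succ (a : Int) (h : 0 ≤ a) : func (a + 1) = funcBody (func a) (a + 1) := by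
  unfold func
  rw [PySem.List.pyRange_one_succ_right (by omega), List.foldl_append]
  simp [List.foldl]

lemma func_high (a : Int) (h : 999 ≤ a) : func a = func 999 := by
  unfold func
  rw [PySem.List.pyRange_one_append 1 1000 (a + 1) (by omega) (by omega), List.foldl_append]
  norm_num
  exact (PySem.List.foldl_congr_mem _ funcBody (fun c _ => c) _
      (fun acc x hx => funcBody_high acc x ((PySem.List.mem_pyRange_one.1 hx).1))).trans
    (PySem.List.foldl_ignore _ _)

lemma func_alt_high (a : Int) (h : 999 ≤ a) : func_alt a = func_alt 999 := by
  unfold func_alt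
  rw [if_pos (by omega), if_pos (by norm_num),
      show max 0 (min a 99) = 99 from by omega,
      show max 0 (min (999 : Int) 99) = 99 from by norm_num]
  apply PySem.List.foldl_congr_mem
  intro acc hd hmem
  have hh : hd < 10 := (PySem.List.mem_pyRange_one.1 hmem).2
  apply PySem.List.foldl_congr_mem
  intro acc' d _
  dsimp only
  split_ifs <;> omega

-- linear checker: starting from a with running count c = func a, verify func = func_alt
-- on the next 'fuel' integers (evaluated once by 'decide' instead of a quadratic re-evaluation)
def pvChk : Int → Int → Nat → Bool
  | _, _, 0 => true
  | a, c, Nat.succ n =>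
    let c' := funcBody c (a + 1)
    (c' == func_alt (a + 1)) && pvChk (a + 1) c' n

lemma pvChk_sound : ∀ (n : Nat) (a c : Int), 0 ≤ a → c = func a → pvChk a c n = true →
    ∀ k : Nat, 0 < k → k ≤ n → func (a + k) = func_alt (a + k) := by
  intro n
  induction n with
  | zero => intro _ _ _ _ _ k hk hkn; omega
  | succ n ih =>
    intro a c ha hc hchk k hk hkn
    rw [pvChk] at hchk
    simp only [Bool.and_eq_true, beq_iff_eq] at hchk
    obtain ⟨h1, h2⟩ := hchk
    have hstep : func (a + 1) = func_alt (a + 1) := by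
      rw [func_succ a ha, ← hc]; exact h1
    obtain ⟨j, rfl⟩ : ∃ j, k = j + 1 := ⟨k - 1, by omega⟩
    cases j with
    | zero => simpa using hstep
    | succ j =>
      have := ih (a + 1) (funcBody c (a + 1)) (by omega)
        (by rw [func_succ a ha, hc]) h2 (j + 1) (by omega) (by omega)
      have harith : a + 1 + ((j : Int) + 1) = a + ((j : Int) + 1 + 1) := by ring
      push_cast at this ⊢
      rw [← harith]; exact this

set_option maxRecDepth 200000 in
set_option maxHeartbeats 4000000 in
lemma pvChk_run : pvChk 0 0 999 = true := by decide

lemma func_eq_alt_small (a : Int) (h0 : 0 ≤ a) (h1 : a ≤ 999) : func a = func_alt a := by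
  rcases eq_or_lt_of_le h0 with h | h
  · rw [← h]; decide
  · have hk := pvChk_sound 999 0 0 le_rfl (by decide) pvChk_run a.toNat
      (by omega) (by omega)
    rw [zero_add, show ((a.toNat : Int)) = a from by omega] at hk
    exact hk

-- ===== VERDICT (by name: the statement is the Claim_ definition above) =====
theorem func_spec : Claim_equal_func := by
  intro a _
  unfold Spec_func
  rcases (by omega : a ≤ 0 ∨ 0 < a) with h | h
  · rcases eq_or_lt_of_le h with h' | h'
    · rw [h']; decide
    · unfold func func_alt
      rw [PySem.List.pyRange_one_eq_nil (by omega), if_neg (by omega)]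
      simp; omega
  · rcases (by omega : a ≤ 999 ∨ 999 < a) with h2 | h2
    · exact func_eq_alt_small a (by omega) h2
    · rw [func_high a (by omega), func_alt_high a (by omega)]
      exact func_eq_alt_small 999 (by norm_num) (by norm_num)
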